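-- pv_equiv track=rewrite | github.com/Riib11/TraitsGenealogy | test.py | ind_to_bin
-- ===== SOURCE A (Python) =====
-- def ind_to_bin(i):
--     if i == 0:
--         return [0]
--
--     if i % 2 == 0: arr = [ 0 for i in range(i//2+1) ]
--     else: arr = [ 0 for i in range(i//2 + 1)]
--
--     for b in range(len(arr)):
--         arr[b] = int(i % (b+1) == 0)
--     return arr
-- ===== SOURCE B (Python) =====
-- def ind_to_bin(i):
--     if i == 0:
--         return [0]
--     n = i // 2 + 1
--     if n <= 0:
--         return []
--     # collect all divisors of i by trial division up to sqrt(i)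
--     divs = set()
--     d = 1
--     while d * d <= i:
--         if i % d == 0:
--             divs.add(d)
--             divs.add(i // d)
--         d += 1
--     return [1 if b + 1 in divs else 0 for b in range(n)]
-- ===== Notes on version B (the rewrite author's own statement) =====
-- stated objective: faster
-- what changed: Instead of testing i % (b+1) at every index, B finds all divisors of i once by trial division up to sqrt(i) into a set and then marks positions by set membership.
import Mathlib
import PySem

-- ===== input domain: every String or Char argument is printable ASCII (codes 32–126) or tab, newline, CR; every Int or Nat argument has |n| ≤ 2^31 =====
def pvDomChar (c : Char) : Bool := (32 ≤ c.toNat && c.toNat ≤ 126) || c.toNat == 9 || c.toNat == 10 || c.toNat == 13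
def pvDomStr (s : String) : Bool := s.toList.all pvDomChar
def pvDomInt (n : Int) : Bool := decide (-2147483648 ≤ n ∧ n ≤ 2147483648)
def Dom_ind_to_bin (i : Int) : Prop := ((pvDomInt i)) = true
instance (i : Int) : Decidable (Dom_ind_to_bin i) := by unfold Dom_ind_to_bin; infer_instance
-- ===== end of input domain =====

-- B finds the divisors of i once by trial division up to sqrt(i) into a set and then marks
-- positions by set membership, instead of testing i % (b+1) at every index (objective: faster).

-- ===== PORT A =====
-- arr[b] = v with 0 ≤ b < len(arr) is exactly List.set at b.toNat (no IndexError reachable)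
def ind_to_bin (i : Int) : List Int :=
  if i == 0 then [0]
  else
    let arr : List Int :=
      if PySem.Int.mod i 2 == 0 then
        (PySem.List.pyRange 0 (PySem.Int.floordiv i 2 + 1) 1).map (fun _ => (0 : Int))
      else
        (PySem.List.pyRange 0 (PySem.Int.floordiv i 2 + 1) 1).map (fun _ => (0 : Int))
    (PySem.List.pyRange 0 (arr.length : Int) 1).foldl
      (fun a b => a.set b.toNat (if PySem.Int.mod i (b + 1) == 0 then 1 else 0)) arr

-- ===== PORT B =====
-- the 'while d * d <= i' trial-division loop of Source B
def divLoop (i d : Int) (s : PySem.Set Int) : PySem.Set Int :=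
  if d * d ≤ i then
    divLoop i (d + 1)
      (if PySem.Int.mod i d == 0 then
        PySem.Set.add (PySem.Set.add s d) (PySem.Int.floordiv i d)
      else s)
  else s
termination_by (i + 1 - d).toNat
decreasing_by
  have h1 : d ≤ d * d := by
    rcases le_or_gt d 0 with h | h
    · nlinarith
    · nlinarith
  omega

def ind_to_bin_alt (i : Int) : List Int :=
  if i = 0 then [0]
  else
    let n := PySem.Int.floordiv i 2 + 1
    if n ≤ 0 then []
    else
      let divs := divLoop i 1 PySem.Set.empty
      (PySem.List.pyRange 0 n 1).map (fun b => if (b + 1) ∈ divs then (1 : Int) else 0)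

-- ===== PRECONDITION & SPEC =====
def Spec_ind_to_bin (i : Int) (out : List Int) : Prop := out = ind_to_bin_alt i
instance (i : Int) (out : List Int) : Decidable (Spec_ind_to_bin i out) := by unfold Spec_ind_to_bin; infer_instance

-- ===== CLAIM (what is proved, stated in full; the proofs are below) =====
def Claim_equal_ind_to_bin : Prop := ∀ (i : Int), Dom_ind_to_bin i → Spec_ind_to_bin i (ind_to_bin i)

-- ===== LEMMAS AND PROOFS =====

lemma mem_divLoop (i d : Int) (hd : 0 < d) (s : PySem.Set Int) (x : Int) :
    x ∈ divLoop i d s ↔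
      x ∈ s ∨ ∃ e, d ≤ e ∧ e * e ≤ i ∧ PySem.Int.mod i e = 0 ∧
        (x = e ∨ x = PySem.Int.floordiv i e) := by
  fun_induction divLoop i d s with
  | case1 d s hcond ih =>
    simp only [dite_eq_ite] at ih
    rw [ih (by omega)]
    by_cases hm : PySem.Int.mod i d = 0
    · simp only [hm, beq_self_eq_true, if_true, PySem.Set.mem_add]
      constructor
      · rintro (((hs | h) | h) | ⟨e, he, h2, h3, h4⟩)
        · exact Or.inl hs
        · exact Or.inr ⟨d, le_refl d, hcond, hm, Or.inl h⟩
        · exact Or.inr ⟨d, le_refl d, hcond, hm, Or.inr h⟩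
        · exact Or.inr ⟨e, by omega, h2, h3, h4⟩
      · rintro (hs | ⟨e, he, h2, h3, h4⟩)
        · exact Or.inl (Or.inl (Or.inl hs))
        · rcases eq_or_lt_of_le he with rfl | hlt
          · rcases h4 with rfl | rfl
            · exact Or.inl (Or.inl (Or.inr rfl))
            · exact Or.inl (Or.inr rfl)
          · exact Or.inr ⟨e, by omega, h2, h3, h4⟩
    · rw [if_neg (by simpa using hm)]
      constructor
      · rintro (hs | ⟨e, he, h2, h3, h4⟩)
        · exact Or.inl hs
        · exact Or.inr ⟨e, by omega, h2, h3, h4⟩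
      · rintro (hs | ⟨e, he, h2, h3, h4⟩)
        · exact Or.inl hs
        · rcases eq_or_lt_of_le he with rfl | hlt
          · exact absurd h3 hm
          · exact Or.inr ⟨e, by omega, h2, h3, h4⟩
  | case2 d s hcond =>
    constructor
    · exact Or.inl
    · rintro (hs | ⟨e, he, h2, h3, h4⟩)
      · exact hs
      · exfalso
        nlinarith

lemma mem_divisors (i : Int) (hi : 1 ≤ i) (k : Int) (hk : 1 ≤ k) :
    k ∈ divLoop i 1 PySem.Set.empty ↔ k ∣ i := by
  rw [mem_divLoop i 1 one_pos PySem.Set.empty k]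
  simp only [PySem.Set.empty, List.not_mem_nil, false_or]
  constructor
  · rintro ⟨e, he1, he2, he3, (rfl | rfl)⟩
    · exact (PySem.Int.mod_eq_zero_iff_dvd i k).mp he3
    · have hdvd : e ∣ i := (PySem.Int.mod_eq_zero_iff_dvd i e).mp he3
      rw [PySem.Int.floordiv_eq_ediv_of_pos (by omega)]
      exact Int.ediv_dvd_of_dvd hdvd
  · intro hdvd
    by_cases hsq : k * k ≤ i
    · exact ⟨k, hk, hsq, (PySem.Int.mod_eq_zero_iff_dvd i k).mpr hdvd, Or.inl rfl⟩
    · refine ⟨i / k, ?_, ?_, ?_, Or.inr ?_⟩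
      · have hki : k ≤ i := Int.le_of_dvd (by omega) hdvd
        rw [Int.le_ediv_iff_mul_le (by omega)]
        omega
      · have heq : i / k * k = i := Int.ediv_mul_cancel hdvd
        have h1 : 1 ≤ i / k := by
          have hki : k ≤ i := Int.le_of_dvd (by omega) hdvd
          rw [Int.le_ediv_iff_mul_le (by omega)]; omega
        nlinarith
      · refine (PySem.Int.mod_eq_zero_iff_dvd i (i / k)).mpr ?_
        exact Int.ediv_dvd_of_dvd hdvd
      · have heq : i / k * k = i := Int.ediv_mul_cancel hdvd
        have h1 : 1 ≤ i / k := by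
          have hki : k ≤ i := Int.le_of_dvd (by omega) hdvd
          rw [Int.le_ediv_iff_mul_le (by omega)]; omega
        rw [PySem.Int.floordiv_eq_ediv_of_pos (by omega)]
        have h2 := Int.mul_ediv_cancel_left (a := i / k) (b := k) (by omega)
        rw [heq] at h2
        exact h2.symm

lemma foldl_set_range (g : Nat → Int) (n : Nat) (arr : List Int) (h : n ≤ arr.length) :
    (List.range n).foldl (fun a k => a.set k (g k)) arr
      = (List.range n).map g ++ arr.drop n := by
  induction n with
  | zero => simp
  | succ m ih =>
    rw [List.range_succ, List.foldl_append, List.map_append, ih (by omega)]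
    simp only [List.foldl_cons, List.foldl_nil]
    rw [List.set_append, if_neg (by simp)]
    simp only [List.length_map, List.length_range, Nat.sub_self]
    have hd : List.drop m arr = arr[m]'(by omega) :: List.drop (m + 1) arr :=
      List.drop_eq_getElem_cons (by omega)
    rw [hd, List.set_cons_zero]
    simp only [List.append_assoc, List.map_cons, List.map_nil, List.cons_append, List.nil_append]

theorem ind_to_bin_eq_alt (i : Int) : ind_to_bin i = ind_to_bin_alt i := by
  by_cases h0 : i = 0
  · subst h0; rfl
  · unfold ind_to_bin ind_to_bin_alt
    rw [if_neg (by simpa using h0), if_neg h0]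
    simp only [ite_self]
    set n : Int := PySem.Int.floordiv i 2 + 1 with hn
    by_cases hneg : n ≤ 0
    · rw [if_pos hneg]
      have hz : (PySem.List.pyRange 0 n 1) = [] := by
        rw [PySem.List.pyRange_one]
        have : (n - 0).toNat = 0 := by omega
        rw [this]; rfl
      simp [hz]
    · rw [if_neg hneg]
      have hipos : 1 ≤ i := by
        by_contra hle
        have : i ≤ -1 := by omega
        have : PySem.Int.floordiv i 2 ≤ -1 := by
          have := PySem.Int.floordiv_lt_iff_lt_mul (a := i) (b := 2) (q := 0) (by omega)
          omega
        omega
      have hlen : ((PySem.List.pyRange 0 n 1).map (fun _ => (0:Int))).length = n.toNat := by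
        simp [PySem.List.length_pyRange_one]
      rw [hlen]
      have hcast : ((n.toNat : Int)) = n := by omega
      rw [hcast]
      rw [PySem.List.pyRange_one]
      simp only [Int.sub_zero, List.foldl_map, List.map_map, Function.comp_def, zero_add,
        Int.toNat_natCast]
      rw [foldl_set_range (g := fun k => if (PySem.Int.mod i ((k:Int) + 1) == 0) = true then (1:Int) else 0)
        n.toNat _ (by simp)]
      rw [List.drop_eq_nil_of_le (by simp), List.append_nil]
      refine List.map_congr_left ?_
      intro k hk
      have hk1 : (1:Int) ≤ (k:Int) + 1 := by omega
      by_cases hdvd : ((k:Int) + 1) ∣ i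
      · rw [if_pos (by simpa using (PySem.Int.mod_eq_zero_iff_dvd i ((k:Int)+1)).mpr hdvd),
          if_pos ((mem_divisors i hipos _ hk1).mpr hdvd)]
      · rw [if_neg (by simpa using fun h => hdvd ((PySem.Int.mod_eq_zero_iff_dvd i ((k:Int)+1)).mp h)),
          if_neg (fun h => hdvd ((mem_divisors i hipos _ hk1).mp h))]

-- ===== VERDICT (by name: the statement is the Claim_ definition above) =====
theorem ind_to_bin_spec : Claim_equal_ind_to_bin := by
  unfold Claim_equal_ind_to_bin Spec_ind_to_bin
  intro i _
  exact ind_to_bin_eq_alt i
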